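-- pv_equiv track=rewrite | github.com/pypi-data/pypi-mirror-367 | packages/odam-sdk/odam_sdk-2.0.0.tar.gz/odam_sdk-2.0.0/odam_sdk/utils.py | is_medical_context
-- ===== SOURCE A (Python) =====
-- def is_medical_context(text: str) -> bool:
--     """
--     Визначення чи текст містить медичний контекст
--
--     Args:
--         text: Текст для аналізу
--
--     Returns:
--         True якщо текст містить медичний контекст
--     """
--     medical_keywords = [
--         'лікар', 'лікування', 'хвороба', 'симптом', 'діагноз',
--         'ліки', 'таблетки', 'укол', 'операція', 'рецепт',
--         'doctor', 'treatment', 'disease', 'symptom', 'diagnosis',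
--         'medicine', 'pills', 'injection', 'surgery', 'prescription'
--     ]
--
--     text_lower = text.lower()
--     return any(keyword in text_lower for keyword in medical_keywords)
-- ===== SOURCE B (Python) =====
-- def is_medical_context(text: str) -> bool:
--     """First-character index: build a dict mapping each keyword's first
--     character to the list of keyword tails, then scan the lowered text once,
--     testing only the keywords whose first letter matches the current char."""
--     medical_keywords = [
--         'лікар', 'лікування', 'хвороба', 'симптом', 'діагноз',
--         'ліки', 'таблетки', 'укол', 'операція', 'рецепт',
--         'doctor', 'treatment', 'disease', 'symptom', 'diagnosis',
--         'medicine', 'pills', 'injection', 'surgery', 'prescription'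
--     ]
--     index = {}
--     for kw in medical_keywords:
--         index.setdefault(kw[0], []).append(kw[1:])
--     t = text.lower()
--     for i in range(len(t)):
--         for tail in index.get(t[i], []):
--             if t.startswith(tail, i + 1):
--                 return True
--     return False
-- ===== Notes on version B (the rewrite author's own statement) =====
-- stated objective: alternative
-- what changed: Replaces A's keyword-major traversal (20 independent 'kw in text' substring scans) by a dict index from first character to keyword tails built once, plus a single position-major scan of the lowered text that tests only the keywords whose first letter matches the current character.
import Mathlib
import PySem

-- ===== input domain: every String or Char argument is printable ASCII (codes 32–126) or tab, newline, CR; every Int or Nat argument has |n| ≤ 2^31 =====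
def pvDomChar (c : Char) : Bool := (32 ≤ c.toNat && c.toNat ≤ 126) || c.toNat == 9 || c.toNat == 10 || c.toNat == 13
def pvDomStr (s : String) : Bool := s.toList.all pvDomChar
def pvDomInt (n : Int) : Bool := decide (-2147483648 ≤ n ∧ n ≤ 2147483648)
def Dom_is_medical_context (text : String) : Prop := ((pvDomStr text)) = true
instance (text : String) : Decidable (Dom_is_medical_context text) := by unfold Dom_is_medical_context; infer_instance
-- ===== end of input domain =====

-- B replaces A's 20 independent 'kw in text' substring scans by a dict index from
-- first character to keyword tails built once, plus a single position-major scan of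
-- the lowered text that tests only keywords whose first letter matches (alternative).

-- ===== PORT A =====
def aMedicalKeywords : List String :=
  ["лікар", "лікування", "хвороба", "симптом", "діагноз",
   "ліки", "таблетки", "укол", "операція", "рецепт",
   "doctor", "treatment", "disease", "symptom", "diagnosis",
   "medicine", "pills", "injection", "surgery", "prescription"]

def is_medical_context (text : String) : Bool :=
  let text_lower := PySem.Str.lower text
  aMedicalKeywords.any (fun keyword => PySem.Str.isIn keyword text_lower)

-- ===== PORT B =====
def bMedicalKeywords : List String :=
  ["лікар", "лікування", "хвороба", "симптом", "діагноз",
   "ліки", "таблетки", "укол", "операція", "рецепт",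
   "doctor", "treatment", "disease", "symptom", "diagnosis",
   "medicine", "pills", "injection", "surgery", "prescription"]

-- the body of 'for kw in medical_keywords: index.setdefault(kw[0], []).append(kw[1:])';
-- the [] branch is unreachable (every keyword literal is nonempty, where Python's kw[0] returns)
def bStep (index : PySem.Dict Char (List (List Char))) (kw : String) :
    PySem.Dict Char (List (List Char)) :=
  match kw.toList with
  | [] => index
  | c :: tail => index.insert c (index.getD c [] ++ [tail])

def bIndex : PySem.Dict Char (List (List Char)) :=
  bMedicalKeywords.foldl bStep PySem.Dict.empty

-- 'for i in range(len(t)): for tail in index.get(t[i], []): if t.startswith(tail, i+1)':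
-- the outer index loop is structural recursion on the suffix of t starting at i (exact)
def bLoop : List Char → Bool
  | [] => false
  | c :: rest =>
      (bIndex.getD c []).any (fun tail => PySem.Chars.startswith rest tail) || bLoop rest

def is_medical_context_alt (text : String) : Bool :=
  bLoop (PySem.Str.lower text).toList

-- ===== PRECONDITION & SPEC =====
def Spec_is_medical_context (text : String) (out : Bool) : Prop := out = is_medical_context_alt text
instance (text : String) (out : Bool) : Decidable (Spec_is_medical_context text out) := by unfold Spec_is_medical_context; infer_instance

-- ===== CLAIM (what is proved, stated in full; the proofs are below) =====
def Claim_equal_is_medical_context : Prop := ∀ (text : String), Dom_is_medical_context text → Spec_is_medical_context text (is_medical_context text)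

-- ===== LEMMAS AND PROOFS =====

-- one fold step of the index construction files tl under c iff it was already there
-- or the keyword is exactly c :: tl
lemma step_mem (d : PySem.Dict Char (List (List Char))) (k : String) (c : Char) (tl : List Char) :
    tl ∈ (bStep d k).getD c [] ↔ tl ∈ d.getD c [] ∨ k.toList = c :: tl := by
  cases hk : k.toList with
  | nil => simp [bStep, hk]
  | cons k0 kt =>
      by_cases hc : c = k0
      · subst hc
        simp only [bStep, hk, PySem.Dict.getD, PySem.Dict.get?_insert_self, Option.getD_some,
          List.mem_append, List.mem_singleton, List.cons.injEq, true_and]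
        tauto
      · simp only [bStep, hk, PySem.Dict.getD, PySem.Dict.get?_insert_of_ne _ _ hc,
          List.cons.injEq]
        tauto

-- the fold invariant over the whole keyword list
lemma build_mem (kws : List String) (d : PySem.Dict Char (List (List Char)))
    (c : Char) (tl : List Char) :
    tl ∈ (kws.foldl bStep d).getD c []
    ↔ tl ∈ d.getD c [] ∨ ∃ kw ∈ kws, kw.toList = c :: tl := by
  induction kws generalizing d with
  | nil => simp
  | cons k ks ih =>
      simp only [List.foldl_cons, ih, step_mem, List.mem_cons]
      constructor
      · rintro ((h | h) | ⟨kw, hkw, he⟩)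
        · exact Or.inl h
        · exact Or.inr ⟨k, Or.inl rfl, h⟩
        · exact Or.inr ⟨kw, Or.inr hkw, he⟩
      · rintro (h | ⟨kw, hkw | hkw, he⟩)
        · exact Or.inl (Or.inl h)
        · exact Or.inl (Or.inr (hkw ▸ he))
        · exact Or.inr ⟨kw, hkw, he⟩

-- what the finished index contains
lemma idx_mem (c : Char) (tl : List Char) :
    tl ∈ bIndex.getD c [] ↔ ∃ kw ∈ bMedicalKeywords, kw.toList = c :: tl := by
  rw [bIndex, build_mem]
  simp [PySem.Dict.getD]

-- B's scan finds exactly the keywords occurring as an infix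
lemma bLoop_iff (cs : List Char) :
    bLoop cs = true ↔ ∃ kw ∈ bMedicalKeywords, kw.toList <:+: cs := by
  induction cs with
  | nil =>
      refine iff_of_false (by simp [bLoop]) ?_
      rintro ⟨kw, hkw, hinf⟩
      have hne : ∀ kw ∈ bMedicalKeywords, kw.toList ≠ [] := by decide
      exact hne kw hkw (List.infix_nil.mp hinf)
  | cons c rest ih =>
      simp only [bLoop, Bool.or_eq_true, List.any_eq_true, ih, idx_mem]
      constructor
      · rintro (⟨tl, ⟨kw, hkw, he⟩, hsw⟩ | ⟨kw, hkw, hinf⟩)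
        · refine ⟨kw, hkw, ?_⟩
          have hpre : kw.toList <+: c :: rest := by
            rw [he]
            exact (List.cons_prefix_cons).mpr ⟨rfl, (PySem.Chars.startswith_iff _ _).mp hsw⟩
          exact hpre.isInfix
        · exact ⟨kw, hkw, hinf.trans (List.suffix_cons c rest).isInfix⟩
      · rintro ⟨kw, hkw, hinf⟩
        rcases List.infix_cons_iff.mp hinf with hpre | hsuf
        · rcases hkl : kw.toList with _ | ⟨k0, kt⟩
          · have hne : ∀ kw ∈ bMedicalKeywords, kw.toList ≠ [] := by decide
            exact absurd hkl (hne kw hkw)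
          · rw [hkl] at hpre
            obtain ⟨rfl, htl⟩ := List.cons_prefix_cons.mp hpre
            exact Or.inl ⟨kt, ⟨kw, hkw, hkl⟩, (PySem.Chars.startswith_iff _ _).mpr htl⟩
        · exact Or.inr ⟨kw, hkw, hsuf⟩

-- the two Booleans agree: both are 'some keyword is an infix of the lowered text'
lemma any_isIn_eq_bLoop (s : List Char) :
    (aMedicalKeywords.any (fun kw => PySem.Chars.isIn kw.toList s)) = bLoop s := by
  have hiff : (aMedicalKeywords.any (fun kw => PySem.Chars.isIn kw.toList s)) = true
      ↔ bLoop s = true := by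
    rw [bLoop_iff, show aMedicalKeywords = bMedicalKeywords from rfl]
    simp only [List.any_eq_true, PySem.Chars.isIn_iff_infix]
  cases h1 : aMedicalKeywords.any (fun kw => PySem.Chars.isIn kw.toList s) <;>
  cases h2 : bLoop s <;> simp_all

-- ===== VERDICT (by name: the statement is the Claim_ definition above) =====
theorem is_medical_context_spec : Claim_equal_is_medical_context := by
  intro text _
  unfold Spec_is_medical_context is_medical_context is_medical_context_alt
  have : ∀ kw s, PySem.Str.isIn kw s = PySem.Chars.isIn kw.toList s.toList := by
    intro kw s; simp [PySem.Str.isIn]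
  simp only [this]
  exact any_isIn_eq_bLoop (PySem.Str.lower text).toList
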